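-- pv_equiv track=rewrite | github.com/Patrix726/Competitive-Programming | Leetcode/removeStars.py | removeStars
-- ===== SOURCE A (Python) =====
-- def removeStars(s: str) -> str:
--     arr = []
--
--     for i in s:
--         if i == "*":
--             arr.pop()
--         else:
--             arr.append(i)
--     return "".join(arr)
-- ===== SOURCE B (Python) =====
-- def removeStars(s: str) -> str:
--     skip = 0
--     out = []
--     for c in reversed(s):
--         if c == "*":
--             skip += 1
--         elif skip:
--             skip -= 1
--         else:
--             out.append(c)
--     return "".join(reversed(out))
-- ===== Notes on version B (the rewrite author's own statement) =====
-- stated objective: alternative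
-- what changed: Replaces the left-to-right character stack (append/pop) by a right-to-left scan with an integer skip counter, so no stack is ever built; the surviving characters are collected in reverse and reversed once at the end.
-- outside the precondition, e.g. on removeStars('*'): A raises IndexError, B returns ''
import Mathlib
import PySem

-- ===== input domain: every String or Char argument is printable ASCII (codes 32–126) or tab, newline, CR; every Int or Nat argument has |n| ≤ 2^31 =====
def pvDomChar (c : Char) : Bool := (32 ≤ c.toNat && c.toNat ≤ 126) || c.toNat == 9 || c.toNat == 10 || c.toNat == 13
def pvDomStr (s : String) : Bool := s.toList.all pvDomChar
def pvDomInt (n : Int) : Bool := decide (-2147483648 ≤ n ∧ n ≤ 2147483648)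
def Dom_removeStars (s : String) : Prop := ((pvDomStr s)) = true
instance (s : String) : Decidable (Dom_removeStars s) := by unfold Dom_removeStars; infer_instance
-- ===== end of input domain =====

-- B replaces A's character stack by a right-to-left scan with a skip counter (alternative
-- decomposition, same cost); equivalence is about the return value on Pre_ (where A returns).

-- ===== PORT A =====
-- one step of A's loop: '*' pops the stack (none = IndexError on empty), else append
def stepA (st : Option (List Char)) (c : Char) : Option (List Char) :=
  match st with
  | none => none
  | some arr => if c = '*' then (if arr = [] then none else some arr.dropLast) else some (arr ++ [c])

def removeStars (s : String) : String :=
  match s.toList.foldl stepA (some []) with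
  | some arr => String.mk arr        -- "".join(arr)
  | none => ""                       -- unreachable under Pre_: Python A raises IndexError here

-- ===== PORT B =====
-- one step of B's loop over reversed(s): '*' bumps skip; else either cancel or keep
def stepB (st : Nat × List Char) (c : Char) : Nat × List Char :=
  if c = '*' then (st.1 + 1, st.2)
  else if st.1 > 0 then (st.1 - 1, st.2)
  else (st.1, st.2 ++ [c])

def removeStars_alt (s : String) : String :=
  String.mk ((s.toList.reverse.foldl stepB (0, [])).2).reverse   -- "".join(reversed(out))

-- ===== PRECONDITION & SPEC =====
-- Pre_ excludes exactly the strings on which A raises IndexError (pop from an empty stack):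
-- those where some prefix has more '*' than other characters.
def Pre_removeStars (s : String) : Prop :=
  ∀ i ≤ s.toList.length, 2 * ((s.toList.take i).count '*') ≤ i
instance (s : String) : Decidable (Pre_removeStars s) := by unfold Pre_removeStars; infer_instance
def pvWitness_removeStars : String := "leet**cod*e"

def Spec_removeStars (s : String) (out : String) : Prop := out = removeStars_alt s
instance (s : String) (out : String) : Decidable (Spec_removeStars s out) := by unfold Spec_removeStars; infer_instance

-- ===== CLAIM (what is proved, stated in full; the proofs are below) =====
def Claim_equal_removeStars : Prop := ∀ (s : String), Dom_removeStars s → Pre_removeStars s → Spec_removeStars s (removeStars s)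

-- ===== LEMMAS AND PROOFS =====

-- the skip counter and output list of B's scan
def kOf (l : List Char) : Nat := (l.reverse.foldl stepB (0, [])).1
def outOf (l : List Char) : List Char := (l.reverse.foldl stepB (0, [])).2

lemma stateB_cons (c : Char) (t : List Char) :
    (c :: t).reverse.foldl stepB (0, []) = stepB (t.reverse.foldl stepB (0, [])) c := by
  simp [List.reverse_cons, List.foldl_append]

lemma kOf_cons (c : Char) (t : List Char) :
    kOf (c :: t) = if c = '*' then kOf t + 1 else kOf t - 1 := by
  unfold kOf
  rw [stateB_cons]
  rcases h : t.reverse.foldl stepB (0, []) with ⟨k, o⟩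
  simp only [stepB]
  split_ifs <;> simp <;> omega

lemma outOf_cons (c : Char) (t : List Char) :
    outOf (c :: t) = if c = '*' ∨ 0 < kOf t then outOf t else outOf t ++ [c] := by
  unfold outOf kOf
  rw [stateB_cons]
  rcases h : t.reverse.foldl stepB (0, []) with ⟨k, o⟩
  simp only [stepB]
  split_ifs with h1 h2 h3 <;> simp_all

-- pointwise facts about A's step, and propagation of the raised state
lemma stepA_star (a : List Char) (h : a ≠ []) : stepA (some a) '*' = some a.dropLast := by
  simp [stepA, h]
lemma stepA_star_nil : stepA (some []) '*' = none := by
  simp [stepA]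
lemma stepA_push (a : List Char) (c : Char) (h : c ≠ '*') : stepA (some a) c = some (a ++ [c]) := by
  simp [stepA, h]
lemma foldA_none (t : List Char) : t.foldl stepA none = none := by
  induction t with
  | nil => rfl
  | cons c t ih => simpa [stepA] using ih

-- core invariant: A's stack fold from any initial stack a, in terms of B's (skip, out)
lemma key (l : List Char) : ∀ a : List Char,
    (kOf l ≤ a.length → l.foldl stepA (some a) = some (a.take (a.length - kOf l) ++ (outOf l).reverse)) ∧
    (a.length < kOf l → l.foldl stepA (some a) = none) := by
  induction l with
  | nil =>
    intro a
    constructor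
    · intro _
      simp [kOf, outOf]
    · intro h
      simp [kOf] at h
  | cons c t ih =>
    intro a
    by_cases hc : c = '*'
    · -- star: A pops, B's skip goes up by one
      subst hc
      have hk' : kOf ('*' :: t) = kOf t + 1 := by rw [kOf_cons]; simp
      have ho' : outOf ('*' :: t) = outOf t := by rw [outOf_cons]; simp
      constructor
      · intro hle
        rw [hk'] at hle
        have hane : a ≠ [] := by
          intro h; subst h; simp at hle
        have hlen : 1 ≤ a.length := by
          cases a with
          | nil => exact absurd rfl hane
          | cons x xs => simp
        have hle' : kOf t ≤ a.dropLast.length := by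
          simp [List.length_dropLast]; omega
        have := (ih a.dropLast).1 hle'
        rw [List.foldl_cons, stepA_star a hane, this, hk', ho']
        congr 2
        rw [List.dropLast_eq_take, List.take_take]
        congr 1
        simp [List.length_dropLast]; omega
      · intro hlt
        rw [hk'] at hlt
        by_cases hane : a = []
        · subst hane
          rw [List.foldl_cons, stepA_star_nil, foldA_none]
        · have hlt' : a.dropLast.length < kOf t := by
            simp only [List.length_dropLast]
            cases a with
            | nil => exact absurd rfl hane
            | cons x xs => simp at hlt ⊢; omega
          have := (ih a.dropLast).2 hlt'
          rw [List.foldl_cons, stepA_star a hane, this]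
    · -- non-star: A pushes c; B cancels it (skip>0) or keeps it
      by_cases hs : 0 < kOf t
      · have hk' : kOf (c :: t) = kOf t - 1 := by rw [kOf_cons]; simp [hc]
        have ho' : outOf (c :: t) = outOf t := by rw [outOf_cons]; simp [hs]
        constructor
        · intro hle
          rw [hk'] at hle
          have hle' : kOf t ≤ (a ++ [c]).length := by simp; omega
          have := (ih (a ++ [c])).1 hle'
          rw [List.foldl_cons, stepA_push a c hc, this, hk', ho']
          congr 2
          rw [List.take_append_of_le_length (by simp; omega)]
          congr 1
          simp; omega
        · intro hlt
          rw [hk'] at hlt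
          have hlt' : (a ++ [c]).length < kOf t := by simp; omega
          have := (ih (a ++ [c])).2 hlt'
          rw [List.foldl_cons, stepA_push a c hc, this]
      · have hs0 : kOf t = 0 := by omega
        have hk' : kOf (c :: t) = 0 := by rw [kOf_cons]; simp [hc, hs0]
        have ho' : outOf (c :: t) = outOf t ++ [c] := by rw [outOf_cons]; simp [hc, hs0]
        constructor
        · intro _
          have := (ih (a ++ [c])).1 (by simp [hs0])
          rw [List.foldl_cons, stepA_push a c hc, this, hk', ho', hs0]
          rw [List.take_of_length_le (by simp)]
          simp
        · intro hlt
          rw [hk'] at hlt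
          omega

-- under the prefix-count bound (shifted by j), the leftover skip is at most j
lemma k_le (l : List Char) : ∀ j : Nat,
    (∀ i ≤ l.length, 2 * ((l.take i).count '*') ≤ i + j) → kOf l ≤ j := by
  induction l with
  | nil => intro j _; simp [kOf]
  | cons c t ih =>
    intro j H
    rw [kOf_cons]
    by_cases hc : c = '*'
    · have hj : 1 ≤ j := by
        have := H 1 (by simp)
        simp [List.take_succ_cons, hc] at this
        omega
      have ht : kOf t ≤ j - 1 := by
        apply ih
        intro i hi
        have := H (i + 1) (by simp; omega)
        simp [List.take_succ_cons, hc] at this ⊢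
        omega
      simp [hc]; omega
    · have ht : kOf t ≤ j + 1 := by
        apply ih
        intro i hi
        have := H (i + 1) (by simp; omega)
        simp [List.take_succ_cons, hc] at this ⊢
        omega
      simp [hc]; omega

-- ===== VERDICT (by name: the statement is the Claim_ definition above) =====
theorem removeStars_spec : Claim_equal_removeStars := by
  intro s _ hpre
  unfold Spec_removeStars removeStars removeStars_alt
  have hk0 : kOf s.toList = 0 := by
    have := k_le s.toList 0 (by intro i hi; simpa using hpre i hi)
    omega
  have := (key s.toList []).1 (by simp [hk0])
  rw [this]
  simp [outOf]
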